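-- pv_equiv track=rewrite | github.com/annabavaresco/pstrentino | docker-compose/api/functions.py | comp_more_severe
-- ===== SOURCE A (Python) =====
-- def comp_more_severe(triage, t_waiting):
--     '''
--         Takes as input the triage color and the attribute .waiting of an instance of the sclass "Hospital"
--         and outputs the number of patients having a level of priority which is higher than that of the
--         input color.
--     '''
--
--     col_list = ['green', 'blue', 'orange', 'red']
--     res = 0
--     if triage == 'white':
--         for c in col_list:
--             res += t_waiting[c]
--     elif triage == 'green':
--         for c in col_list[1:]:
--             res += t_waiting[c]
--     elif triage == 'blue':
--         for c in col_list[2:]: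
--             res += t_waiting[c]
--     elif triage == 'orange':
--         res += t_waiting['red']
--
--     return res
-- ===== SOURCE B (Python) =====
-- def comp_more_severe(triage, t_waiting):
--     rank = {'white': 0, 'green': 1, 'blue': 2, 'orange': 3, 'red': 4}
--     if triage not in rank:
--         return 0
--     r = rank[triage]
--     total = 0
--     for color, count in t_waiting.items():
--         if rank.get(color, -1) > r:
--             total += count
--     return total
-- ===== Notes on version B (the rewrite author's own statement) =====
-- stated objective: alternative
-- what changed: Inverts the traversal: instead of A's five-way branch cascade looping over hand-sliced colour lists and looking each colour up in t_waiting, B makes a single pass over t_waiting itself, adding the counts whose colour's rank in a severity map exceeds the triage colour's rank.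
import Mathlib
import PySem

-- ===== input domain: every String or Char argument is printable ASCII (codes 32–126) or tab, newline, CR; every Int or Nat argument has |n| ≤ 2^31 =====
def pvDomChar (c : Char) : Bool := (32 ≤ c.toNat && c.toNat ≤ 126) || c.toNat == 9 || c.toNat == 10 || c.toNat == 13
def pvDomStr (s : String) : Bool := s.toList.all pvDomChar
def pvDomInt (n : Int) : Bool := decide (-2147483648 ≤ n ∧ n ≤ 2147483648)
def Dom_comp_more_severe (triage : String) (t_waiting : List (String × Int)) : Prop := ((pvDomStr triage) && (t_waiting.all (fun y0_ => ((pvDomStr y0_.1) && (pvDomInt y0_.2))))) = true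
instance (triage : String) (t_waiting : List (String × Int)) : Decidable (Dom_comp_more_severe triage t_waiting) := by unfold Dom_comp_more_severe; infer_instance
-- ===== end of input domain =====

-- B replaces A's branch cascade of loops over a colour list (each doing dict lookups into
-- t_waiting) by a single pass over t_waiting itself, filtering with a severity-rank map
-- (objective: alternative decomposition; inverted traversal — scan the data, not the colours).

-- ===== PORT A =====
-- dict lookup t_waiting[c]; Pre_ guarantees the key is present, so the KeyError case (none) never fires inside Pre_
def pvLookA (t_waiting : List (String × Int)) (c : String) : Int :=
  ((PySem.Dict.mk t_waiting).get? c).getD 0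

def comp_more_severe (triage : String) (t_waiting : List (String × Int)) : Int :=
  let col_list : List String := ["green", "blue", "orange", "red"]
  let res : Int := 0
  if triage = "white" then
    col_list.foldl (fun res c => res + pvLookA t_waiting c) res
  else if triage = "green" then
    (PySem.List.slice col_list (some 1) none).foldl (fun res c => res + pvLookA t_waiting c) res
  else if triage = "blue" then
    (PySem.List.slice col_list (some 2) none).foldl (fun res c => res + pvLookA t_waiting c) res
  else if triage = "orange" then
    res + pvLookA t_waiting "red"
  else
    res

-- ===== PORT B =====
-- the literal dict rank = {'white':0, …, 'red':4}
def pvRank : PySem.Dict String Int :=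
  PySem.Dict.mk [("white", 0), ("green", 1), ("blue", 2), ("orange", 3), ("red", 4)]

-- 'for color, count in t_waiting.items(): if rank.get(color, -1) > r: total += count'
def comp_more_severe_alt (triage : String) (t_waiting : List (String × Int)) : Int :=
  if pvRank.contains triage then
    let r := (pvRank.get? triage).getD 0   -- rank[triage]; the key is present here
    t_waiting.foldl (fun total p => if pvRank.getD p.1 (-1) > r then total + p.2 else total) 0
  else 0

-- ===== PRECONDITION & SPEC =====
-- Pre_ excludes (a) the inputs on which Python A raises KeyError — a recognised non-red triage
-- colour with a strictly-more-severe colour missing from t_waiting — and (b) association lists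
-- with duplicate keys, which represent no Python dict (t_waiting is a dict in Python).
def Pre_comp_more_severe (triage : String) (t_waiting : List (String × Int)) : Prop :=
  (t_waiting.map Prod.fst).Nodup ∧
  (triage = "white" → ("green" ∈ t_waiting.map Prod.fst ∧ "blue" ∈ t_waiting.map Prod.fst ∧ "orange" ∈ t_waiting.map Prod.fst ∧ "red" ∈ t_waiting.map Prod.fst)) ∧
  (triage = "green" → ("blue" ∈ t_waiting.map Prod.fst ∧ "orange" ∈ t_waiting.map Prod.fst ∧ "red" ∈ t_waiting.map Prod.fst)) ∧
  (triage = "blue" → ("orange" ∈ t_waiting.map Prod.fst ∧ "red" ∈ t_waiting.map Prod.fst)) ∧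
  (triage = "orange" → "red" ∈ t_waiting.map Prod.fst)
instance (triage : String) (t_waiting : List (String × Int)) : Decidable (Pre_comp_more_severe triage t_waiting) := by unfold Pre_comp_more_severe; infer_instance

def pvWitness_comp_more_severe : String × (List (String × Int)) :=
  ("white", [("green", 1), ("blue", 2), ("orange", 3), ("red", 4)])

def Spec_comp_more_severe (triage : String) (t_waiting : List (String × Int)) (out : Int) : Prop := out = comp_more_severe_alt triage t_waiting
instance (triage : String) (t_waiting : List (String × Int)) (out : Int) : Decidable (Spec_comp_more_severe triage t_waiting out) := by unfold Spec_comp_more_severe; infer_instance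

-- ===== CLAIM (what is proved, stated in full; the proofs are below) =====
def Claim_equal_comp_more_severe : Prop := ∀ (triage : String) (t_waiting : List (String × Int)), Dom_comp_more_severe triage t_waiting → Pre_comp_more_severe triage t_waiting → Spec_comp_more_severe triage t_waiting (comp_more_severe triage t_waiting)


-- ===== LEMMAS AND PROOFS =====

-- first-match association lookup, default 0 (the value pvLookA computes)
def pvAssoc (L : List (String × Int)) (c : String) : Int :=
  match L with
  | [] => 0
  | (k, v) :: r => if k = c then v else pvAssoc r c

theorem pvLookA_eq_assoc (L : List (String × Int)) (c : String) :
    pvLookA L c = pvAssoc L c := by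
  induction L with
  | nil => rfl
  | cons p r ih =>
    obtain ⟨k, v⟩ := p
    simp only [pvLookA, PySem.Dict.get?_mk_cons, pvAssoc]
    by_cases h : k = c
    · simp [h]
    · simp only [h, if_false, beq_iff_eq, if_neg h]
      exact ih

-- accumulator extraction for a guarded summing fold
theorem foldl_if_eq_sum {α : Type} (P : α → Prop) [DecidablePred P] (f : α → Int) :
    ∀ (L : List α) (a : Int),
      L.foldl (fun s p => if P p then s + f p else s) a
        = a + (L.map (fun p => if P p then f p else 0)).sum := by
  intro L
  induction L with
  | nil => intro a; simp
  | cons x r ih =>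
    intro a
    simp only [List.foldl_cons, List.map_cons, List.sum_cons, ih]
    by_cases h : P x
    · simp only [h, if_pos]; ring
    · simp only [h, if_neg, if_false]; ring

theorem foldl_add_eq_sum (g : String → Int) :
    ∀ (L : List String) (a : Int),
      L.foldl (fun s c => s + g c) a = a + (L.map g).sum := by
  intro L
  induction L with
  | nil => intro a; simp
  | cons x r ih => intro a; simp only [List.foldl_cons, List.map_cons, List.sum_cons, ih]; ring

-- the heart: summing the entries of a duplicate-free association list whose key lies in cols
-- equals summing the lookups of the cols, when cols is duplicate-free and every col is a key
theorem sum_filter_eq_sum_lookup :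
    ∀ (L : List (String × Int)) (cols : List String),
      (L.map Prod.fst).Nodup → cols.Nodup → (∀ c ∈ cols, c ∈ L.map Prod.fst) →
      (L.map (fun p => if p.1 ∈ cols then p.2 else 0)).sum
        = (cols.map (fun c => pvAssoc L c)).sum := by
  intro L
  induction L with
  | nil =>
    intro cols _ _ hsub
    have : cols = [] := List.eq_nil_iff_forall_not_mem.mpr (fun c hc => by simpa using hsub c hc)
    simp [this]
  | cons p rest ih =>
    obtain ⟨k, v⟩ := p
    intro cols hnd hcnd hsub
    have hknotin : k ∉ rest.map Prod.fst := (List.nodup_cons.mp (by simpa using hnd)).1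
    have hndr : (rest.map Prod.fst).Nodup := (List.nodup_cons.mp (by simpa using hnd)).2
    by_cases hk : k ∈ cols
    · -- head key is among cols
      have hperm : cols.Perm (k :: cols.erase k) := List.perm_cons_erase hk
      have hLHSrest :
          (rest.map (fun p => if p.1 ∈ cols then p.2 else 0))
            = rest.map (fun p => if p.1 ∈ cols.erase k then p.2 else 0) := by
        apply List.map_congr_left
        intro q hq
        have hqk : q.1 ≠ k := by
          intro h
          have hmem := List.mem_map_of_mem (f := Prod.fst) hq
          rw [h] at hmem
          exact hknotin hmem
        by_cases hqc : q.1 ∈ cols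
        · have : q.1 ∈ cols.erase k := (List.mem_erase_of_ne hqk).mpr hqc
          simp [hqc, this]
        · have : q.1 ∉ cols.erase k := fun h => hqc (List.mem_of_mem_erase h)
          simp [hqc, this]
      have hRHS :
          (cols.map (fun c => pvAssoc ((k, v) :: rest) c)).sum
            = ((k :: cols.erase k).map (fun c => pvAssoc ((k, v) :: rest) c)).sum :=
        (hperm.map _).sum_eq
      have hRHSrest :
          ((cols.erase k).map (fun c => pvAssoc ((k, v) :: rest) c))
            = (cols.erase k).map (fun c => pvAssoc rest c) := by
        apply List.map_congr_left
        intro c hc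
        have hck : c ≠ k := ((List.Nodup.mem_erase_iff hcnd).mp hc).1
        show (if k = c then v else pvAssoc rest c) = pvAssoc rest c
        rw [if_neg (fun h => hck h.symm)]
      have hIH := ih (cols.erase k) hndr (hcnd.erase k)
        (by
          intro c hc
          have hck : c ≠ k := ((List.Nodup.mem_erase_iff hcnd).mp hc).1
          have hm := hsub c (List.mem_of_mem_erase hc)
          rw [List.map_cons] at hm
          rcases List.mem_cons.mp hm with h | h
          · exact absurd h hck
          · exact h)
      have hL : (((k, v) :: rest).map (fun p => if p.1 ∈ cols then p.2 else 0)).sum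
          = v + (rest.map (fun p => if p.1 ∈ cols.erase k then p.2 else 0)).sum := by
        rw [List.map_cons, List.sum_cons, hLHSrest, if_pos hk]
      have hR : (cols.map (fun c => pvAssoc ((k, v) :: rest) c)).sum
          = v + ((cols.erase k).map (fun c => pvAssoc rest c)).sum := by
        rw [hRHS, List.map_cons, List.sum_cons, hRHSrest]
        congr 1
        show (if k = k then v else pvAssoc rest k) = v
        rw [if_pos rfl]
      rw [hL, hR, hIH]
    · -- head key not among cols
      have hRHS :
          (cols.map (fun c => pvAssoc ((k, v) :: rest) c))
            = cols.map (fun c => pvAssoc rest c) := by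
        apply List.map_congr_left
        intro c hc
        have hck : k ≠ c := fun h => hk (h ▸ hc)
        show (if k = c then v else pvAssoc rest c) = pvAssoc rest c
        rw [if_neg hck]
      have hIH := ih cols hndr hcnd
        (by
          intro c hc
          have hm := hsub c hc
          rw [List.map_cons] at hm
          rcases List.mem_cons.mp hm with h | h
          · rw [h] at hc; exact absurd hc hk
          · exact h)
      rw [List.map_cons, List.sum_cons, if_neg hk, zero_add, hRHS, hIH]

-- the rank map, in closed form
theorem pvRank_getD (c : String) :
    pvRank.getD c (-1)
      = if c = "white" then 0 else if c = "green" then 1 else if c = "blue" then 2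
        else if c = "orange" then 3 else if c = "red" then 4 else -1 := by
  by_cases h1 : c = "white"
  · subst h1; decide
  by_cases h2 : c = "green"
  · subst h2; decide
  by_cases h3 : c = "blue"
  · subst h3; decide
  by_cases h4 : c = "orange"
  · subst h4; decide
  by_cases h5 : c = "red"
  · subst h5; decide
  · have w1 : (("white" : String) == c) = false := beq_eq_false_iff_ne.mpr (fun h => h1 h.symm)
    have w2 : (("green" : String) == c) = false := beq_eq_false_iff_ne.mpr (fun h => h2 h.symm)
    have w3 : (("blue" : String) == c) = false := beq_eq_false_iff_ne.mpr (fun h => h3 h.symm)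
    have w4 : (("orange" : String) == c) = false := beq_eq_false_iff_ne.mpr (fun h => h4 h.symm)
    have w5 : (("red" : String) == c) = false := beq_eq_false_iff_ne.mpr (fun h => h5 h.symm)
    simp only [pvRank, PySem.Dict.getD_eq_get?_getD, PySem.Dict.get?_mk_cons, w1, w2, w3, w4, w5,
      if_false, Bool.false_eq_true, if_neg h1, if_neg h2, if_neg h3, if_neg h4, if_neg h5]
    rfl

-- the rank map contains only the five colours
theorem pvRank_not_contains (c : String) (h1 : c ≠ "white") (h2 : c ≠ "green") (h3 : c ≠ "blue")
    (h4 : c ≠ "orange") (h5 : c ≠ "red") : pvRank.contains c = false := by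
  have w1 : (("white" : String) == c) = false := beq_eq_false_iff_ne.mpr (fun h => h1 h.symm)
  have w2 : (("green" : String) == c) = false := beq_eq_false_iff_ne.mpr (fun h => h2 h.symm)
  have w3 : (("blue" : String) == c) = false := beq_eq_false_iff_ne.mpr (fun h => h3 h.symm)
  have w4 : (("orange" : String) == c) = false := beq_eq_false_iff_ne.mpr (fun h => h4 h.symm)
  have w5 : (("red" : String) == c) = false := beq_eq_false_iff_ne.mpr (fun h => h5 h.symm)
  simp [pvRank, PySem.Dict.contains_mk, w1, w2, w3, w4, w5]

-- B's fold over t_waiting, rewritten through the membership guard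
theorem alt_fold_eq (t_waiting : List (String × Int)) (r : Int) (cols : List String)
    (hc : ∀ c : String, (pvRank.getD c (-1) > r) ↔ c ∈ cols) :
    t_waiting.foldl (fun total p => if pvRank.getD p.1 (-1) > r then total + p.2 else total) 0
      = (t_waiting.map (fun p => if p.1 ∈ cols then p.2 else 0)).sum := by
  have hfun : (fun (total : Int) (p : String × Int) =>
        if pvRank.getD p.1 (-1) > r then total + p.2 else total)
      = (fun total p => if p.1 ∈ cols then total + p.2 else total) := by
    funext total p
    exact if_congr (hc p.1) rfl rfl
  rw [hfun, foldl_if_eq_sum (fun p : String × Int => p.1 ∈ cols) Prod.snd, zero_add]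

-- A's per-case fold, as a sum of lookups
theorem a_fold_eq (t_waiting : List (String × Int)) (cols : List String) :
    cols.foldl (fun res c => res + pvLookA t_waiting c) 0
      = (cols.map (fun c => pvAssoc t_waiting c)).sum := by
  rw [foldl_add_eq_sum, zero_add]
  congr 1
  exact List.map_congr_left (fun c _ => pvLookA_eq_assoc t_waiting c)

-- the common shape of each recognised-colour case
theorem case_eq (t_waiting : List (String × Int)) (r : Int) (cols : List String)
    (hc : ∀ c : String, (pvRank.getD c (-1) > r) ↔ c ∈ cols)
    (hnd : (t_waiting.map Prod.fst).Nodup) (hcnd : cols.Nodup)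
    (hsub : ∀ c ∈ cols, c ∈ t_waiting.map Prod.fst) :
    cols.foldl (fun res c => res + pvLookA t_waiting c) 0
      = t_waiting.foldl (fun total p => if pvRank.getD p.1 (-1) > r then total + p.2 else total) 0 := by
  rw [a_fold_eq, alt_fold_eq t_waiting r cols hc,
    sum_filter_eq_sum_lookup t_waiting cols hnd hcnd hsub]

-- ===== VERDICT (by name: the statement is the Claim_ definition above) =====
theorem comp_more_severe_spec : Claim_equal_comp_more_severe := by
  intro triage t_waiting _ hpre
  obtain ⟨hnd, hw, hg, hb, ho⟩ := hpre
  unfold Spec_comp_more_severe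
  by_cases h1 : triage = "white"
  · subst h1
    obtain ⟨p1, p2, p3, p4⟩ := hw rfl
    have hA : comp_more_severe "white" t_waiting
        = (["green", "blue", "orange", "red"] : List String).foldl
            (fun res c => res + pvLookA t_waiting c) 0 := by
      simp [comp_more_severe]
    have hB : comp_more_severe_alt "white" t_waiting
        = t_waiting.foldl (fun total p => if pvRank.getD p.1 (-1) > 0 then total + p.2 else total) 0 := by
      simp [comp_more_severe_alt, show pvRank.contains "white" = true from by decide,
        show (pvRank.get? "white").getD 0 = 0 from by decide]
    rw [hA, hB]
    exact case_eq t_waiting 0 ["green", "blue", "orange", "red"]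
      (by intro c; rw [pvRank_getD]; split_ifs <;> simp_all <;> omega) hnd (by decide)
      (by intro c hc; fin_cases hc <;> assumption)
  by_cases h2 : triage = "green"
  · subst h2
    obtain ⟨p2, p3, p4⟩ := hg rfl
    have hA : comp_more_severe "green" t_waiting
        = (["blue", "orange", "red"] : List String).foldl
            (fun res c => res + pvLookA t_waiting c) 0 := by
      simp [comp_more_severe,
        show PySem.List.slice ["green", "blue", "orange", "red"] (some 1) none
          = ["blue", "orange", "red"] from by decide]
    have hB : comp_more_severe_alt "green" t_waiting
        = t_waiting.foldl (fun total p => if pvRank.getD p.1 (-1) > 1 then total + p.2 else total) 0 := by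
      simp [comp_more_severe_alt, show pvRank.contains "green" = true from by decide,
        show (pvRank.get? "green").getD 0 = 1 from by decide]
    rw [hA, hB]
    exact case_eq t_waiting 1 ["blue", "orange", "red"]
      (by intro c; rw [pvRank_getD]; split_ifs <;> simp_all <;> omega) hnd (by decide)
      (by intro c hc; fin_cases hc <;> assumption)
  by_cases h3 : triage = "blue"
  · subst h3
    obtain ⟨p3, p4⟩ := hb rfl
    have hA : comp_more_severe "blue" t_waiting
        = (["orange", "red"] : List String).foldl
            (fun res c => res + pvLookA t_waiting c) 0 := by
      simp [comp_more_severe,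
        show PySem.List.slice ["green", "blue", "orange", "red"] (some 2) none
          = ["orange", "red"] from by decide]
    have hB : comp_more_severe_alt "blue" t_waiting
        = t_waiting.foldl (fun total p => if pvRank.getD p.1 (-1) > 2 then total + p.2 else total) 0 := by
      simp [comp_more_severe_alt, show pvRank.contains "blue" = true from by decide,
        show (pvRank.get? "blue").getD 0 = 2 from by decide]
    rw [hA, hB]
    exact case_eq t_waiting 2 ["orange", "red"]
      (by intro c; rw [pvRank_getD]; split_ifs <;> simp_all <;> omega) hnd (by decide)
      (by intro c hc; fin_cases hc <;> assumption)
  by_cases h4 : triage = "orange"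
  · subst h4
    have p4 := ho rfl
    have hA : comp_more_severe "orange" t_waiting
        = (["red"] : List String).foldl (fun res c => res + pvLookA t_waiting c) 0 := by
      simp [comp_more_severe]
    have hB : comp_more_severe_alt "orange" t_waiting
        = t_waiting.foldl (fun total p => if pvRank.getD p.1 (-1) > 3 then total + p.2 else total) 0 := by
      simp [comp_more_severe_alt, show pvRank.contains "orange" = true from by decide,
        show (pvRank.get? "orange").getD 0 = 3 from by decide]
    rw [hA, hB]
    exact case_eq t_waiting 3 ["red"]
      (by intro c; rw [pvRank_getD]; split_ifs <;> simp_all <;> omega) hnd (by decide)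
      (by intro c hc; fin_cases hc <;> assumption)
  by_cases h5 : triage = "red"
  · subst h5
    have hA : comp_more_severe "red" t_waiting
        = ([] : List String).foldl (fun res c => res + pvLookA t_waiting c) 0 := by
      simp [comp_more_severe]
    have hB : comp_more_severe_alt "red" t_waiting
        = t_waiting.foldl (fun total p => if pvRank.getD p.1 (-1) > 4 then total + p.2 else total) 0 := by
      simp [comp_more_severe_alt, show pvRank.contains "red" = true from by decide,
        show (pvRank.get? "red").getD 0 = 4 from by decide]
    rw [hA, hB]
    exact case_eq t_waiting 4 []
      (by intro c; rw [pvRank_getD]; split_ifs <;> simp_all <;> omega) hnd (by decide)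
      (by intro c hc; simp at hc)
  · have hA : comp_more_severe triage t_waiting = 0 := by
      simp [comp_more_severe, h1, h2, h3, h4]
    have hB : comp_more_severe_alt triage t_waiting = 0 := by
      simp [comp_more_severe_alt, pvRank_not_contains triage h1 h2 h3 h4 h5]
    rw [hA, hB]
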